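-- pv_equiv track=rewrite | github.com/Sgzamora28/AcademiaPhi | 2023 1 PAO/Acompañamiento/Resolucion Examen Parcial.py | siglas
-- ===== SOURCE A (Python) =====
-- frase=""
--
-- def siglas(frase, comunes):#"el ying y el yang..."
--     sigla=""
--     palabras=frase.split(" ")#['el','ying','y','el','yang',...]---> len()=10
--                              #len()-1
--                              #10
--             #range(10) -----> [0,10) ---> [0,1,2,3,4,5,6,7,8,9]
--     for i in range(len(palabras)):
--         if i==0 or i==(len(palabras)-1):#'el'
--             sigla+=palabras[i][0]#'e'
--
--         else:
--             if palabras[i] not in comunes: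
--                 sigla+=palabras[i][0]
--
--     return sigla.upper()
-- ===== SOURCE B (Python) =====
-- def siglas(frase, comunes):
--     palabras = frase.split(" ")
--
--     def rest(ws):
--         if not ws:
--             return ""
--         if len(ws) == 1:
--             return ws[0][0]
--         head = "" if ws[0] in comunes else ws[0][0]
--         return head + rest(ws[1:])
--
--     return (palabras[0][0] + rest(palabras[1:])).upper()
-- ===== Notes on version B (the rewrite author's own statement) =====
-- stated objective: alternative
-- what changed: B replaces A's indexed accumulator loop by structural recursion on the word list: the first initial is taken directly, and a recursive helper builds the remainder right-to-left, always taking the singleton (last) word's initial and filtering interior words by membership; no indices or accumulator remain.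
import Mathlib
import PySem

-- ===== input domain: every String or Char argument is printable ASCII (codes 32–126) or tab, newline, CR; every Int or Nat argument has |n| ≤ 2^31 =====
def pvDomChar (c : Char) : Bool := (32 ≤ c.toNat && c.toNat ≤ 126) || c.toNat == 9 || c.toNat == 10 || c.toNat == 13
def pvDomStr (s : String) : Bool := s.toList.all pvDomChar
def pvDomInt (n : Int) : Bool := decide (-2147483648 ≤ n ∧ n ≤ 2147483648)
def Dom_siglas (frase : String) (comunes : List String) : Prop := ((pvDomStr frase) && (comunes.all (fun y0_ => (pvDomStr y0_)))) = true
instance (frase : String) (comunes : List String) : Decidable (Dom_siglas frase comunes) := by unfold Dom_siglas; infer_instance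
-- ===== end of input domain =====

-- B builds the acronym by structural recursion on the word list (first initial, then a recursive
-- helper that filters interior words and always keeps the last) instead of A's indexed accumulator
-- loop; objective: alternative decomposition. Return-value equivalence only.

-- ===== PORT A =====
def siglas (frase : String) (comunes : List String) : String :=
  let sigla : List Char := []
  let palabras : List String := (PySem.Str.split? frase " ").getD []
  let sigla := (PySem.List.pyRange 0 (PySem.List.len palabras)).foldl
    (fun sigla i =>
      if i == 0 || i == PySem.List.len palabras - 1 then
        sigla ++ [PySem.List.pyGetD (PySem.List.pyGetD palabras i "").toList 0 ' ']
      else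
        if !(comunes.contains (PySem.List.pyGetD palabras i "")) then
          sigla ++ [PySem.List.pyGetD (PySem.List.pyGetD palabras i "").toList 0 ' ']
        else sigla) sigla
  PySem.Str.upper (String.ofList sigla)

-- ===== PORT B =====
-- recursive helper 'rest' of Source B: empty → "", singleton (the last word) → its initial,
-- otherwise head's initial iff the head is not in comunes, prepended to the recursive result
def siglasRest (comunes : List String) : List String → List Char
  | [] => []
  | [w] => [PySem.List.pyGetD w.toList 0 ' ']
  | w :: x :: ws =>
      (if comunes.contains w then [] else [PySem.List.pyGetD w.toList 0 ' ']) ++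
        siglasRest comunes (x :: ws)

def siglas_alt (frase : String) (comunes : List String) : String :=
  let palabras : List String := (PySem.Str.split? frase " ").getD []
  PySem.Str.upper (String.ofList
    (PySem.List.pyGetD (PySem.List.pyGetD palabras 0 "").toList 0 ' ' ::
      siglasRest comunes (PySem.List.slice palabras (some 1) none)))

-- ===== PRECONDITION & SPEC =====
-- Pre_ excludes exactly the inputs on which A raises IndexError: ""[0] on an empty word at an
-- indexed position (first word, last word, or an interior word not in comunes).
def Pre_siglas (frase : String) (comunes : List String) : Prop :=
  let p : List String := (PySem.Str.split? frase " ").getD []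
  PySem.List.pyGetD p 0 "" ≠ "" ∧ PySem.List.pyGetD p (-1) "" ≠ "" ∧
    ∀ w ∈ PySem.List.slice p (some 1) (some (-1)), ¬ w ∈ comunes → w ≠ ""
instance (frase : String) (comunes : List String) : Decidable (Pre_siglas frase comunes) := by
  unfold Pre_siglas; infer_instance
def pvWitness_siglas : String × List String := ("el ying y el yang", ["el", "y"])
def Spec_siglas (frase : String) (comunes : List String) (out : String) : Prop := out = siglas_alt frase comunes
instance (frase : String) (comunes : List String) (out : String) : Decidable (Spec_siglas frase comunes out) := by unfold Spec_siglas; infer_instance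

-- ===== CLAIM (what is proved, stated in full; the proofs are below) =====
def Claim_equal_siglas : Prop := ∀ (frase : String) (comunes : List String), Dom_siglas frase comunes → Pre_siglas frase comunes → Spec_siglas frase comunes (siglas frase comunes)

-- ===== LEMMAS AND PROOFS =====

theorem slice_one_neg_one {α : Type} (p : List α) :
    PySem.List.slice p (some 1) (some (-1)) = p.dropLast.drop 1 := by
  simp [PySem.List.slice, PySem.List.clampIdx]
  rcases p with _ | ⟨x, xs⟩
  · simp
  · have h2 : ((↑(xs.length + 1) : Int) + -1).toNat = xs.length := by omega
    have h1 : min 1 (xs.length + 1) = 1 := by omega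
    simp only [List.length_cons, if_neg (List.cons_ne_nil x xs), h2, h1,
      List.drop_succ_cons, List.drop_zero, List.dropLast_eq_take]
    rcases xs with _ | ⟨y, ys⟩
    · simp
    · simp [List.take_succ_cons]

-- A's indexed loop, characterised positionally (first initial, filtered interior, last initial)
theorem chars_eq (p : List String) (comunes : List String) (hp : p ≠ []) :
    (PySem.List.pyRange 0 (PySem.List.len p)).foldl
      (fun sigla i =>
        if i == 0 || i == PySem.List.len p - 1 then
          sigla ++ [PySem.List.pyGetD (PySem.List.pyGetD p i "").toList 0 ' ']
        else
          if !(comunes.contains (PySem.List.pyGetD p i "")) then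
            sigla ++ [PySem.List.pyGetD (PySem.List.pyGetD p i "").toList 0 ' ']
          else sigla) [] =
    (let sigla : List Char := [PySem.List.pyGetD (PySem.List.pyGetD p 0 "").toList 0 ' '];
     let sigla := (PySem.List.slice p (some 1) (some (-1))).foldl
        (fun sigla w =>
          if !(comunes.contains w) then sigla ++ [PySem.List.pyGetD w.toList 0 ' '] else sigla) sigla;
     if 1 < p.length then
        sigla ++ [PySem.List.pyGetD (PySem.List.pyGetD p (-1) "").toList 0 ' ']
      else sigla) := by
  have hlen : PySem.List.len p = (p.length : Int) := by simp [PySem.List.len]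
  rw [slice_one_neg_one]
  by_cases h1 : p.length = 1
  · obtain ⟨x, rfl⟩ := List.length_eq_one_iff.mp h1
    simp [PySem.List.len, PySem.List.pyRange]
  · have h2 : 2 ≤ p.length := by
      rcases p with _ | ⟨a, l⟩; · exact absurd rfl hp
      rcases l with _ | _; · exact absurd rfl h1
      simp
    have hn2 : (2 : Int) ≤ PySem.List.len p := by rw [hlen]; exact_mod_cast h2
    rw [PySem.List.pyRange_one_append 0 1 (PySem.List.len p) (by omega) (by omega),
        PySem.List.pyRange_one_append 1 (PySem.List.len p - 1) (PySem.List.len p) (by omega) (by omega),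
        List.foldl_append, List.foldl_append]
    have hc3 : PySem.List.pyRange (PySem.List.len p - 1) (PySem.List.len p) = [PySem.List.len p - 1] := by
      rw [PySem.List.pyRange_one_cons (by omega), PySem.List.pyRange_one_eq_nil (by omega)]
    rw [hc3]
    simp only [List.foldl_cons, List.foldl_nil]
    rw [if_pos (by simp)]
    have hlast : PySem.List.pyGetD p (PySem.List.len p - 1) "" = PySem.List.pyGetD p (-1) "" := by
      rw [PySem.List.pyGetD_neg_one p "" hp,
          PySem.List.pyGetD_eq_getElem p "" (by omega) (by omega)]
      rw [List.getLast_eq_getElem]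
      congr 1
      omega
    rw [hlast, if_pos (by omega)]
    congr 1
    have hc1 : PySem.List.pyRange 0 1 = [0] := by
      rw [PySem.List.pyRange_one_cons (by norm_num), PySem.List.pyRange_one_eq_nil (by norm_num)]
    rw [hc1]
    simp only [List.foldl_cons, List.foldl_nil]
    rw [if_pos (by simp), List.nil_append]
    rw [PySem.List.foldl_congr_mem _ _
      (fun (sigla : List Char) (i : Int) =>
        if !(comunes.contains (PySem.List.pyGetD p.dropLast i "")) then
          sigla ++ [PySem.List.pyGetD (PySem.List.pyGetD p.dropLast i "").toList 0 ' ']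
        else sigla) _
      (by
        intro acc i hi
        obtain ⟨hi1, hi2⟩ := PySem.List.mem_pyRange_one.mp hi
        rw [if_neg (by
          simp only [Bool.or_eq_true, beq_iff_eq, not_or]
          exact ⟨by omega, by omega⟩)]
        have hdl : PySem.List.pyGetD p i "" = PySem.List.pyGetD p.dropLast i "" := by
          rw [PySem.List.pyGetD_eq_getElem p "" (by omega) (by omega),
              PySem.List.pyGetD_eq_getElem p.dropLast "" (by omega)
                (by simp only [List.length_dropLast]; omega)]
          exact (List.getElem_dropLast _).symm
        rw [hdl])]
    have hlen' : PySem.List.len p - 1 = PySem.List.len p.dropLast := by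
      simp only [PySem.List.len, List.length_dropLast]
      omega
    rw [hlen', PySem.List.foldl_pyRange_pyGetD p.dropLast ""
      (fun (sigla : List Char) (w : String) =>
        if !(comunes.contains w) then sigla ++ [PySem.List.pyGetD w.toList 0 ' '] else sigla)
      _ (by norm_num)]
    norm_num

-- B's recursive helper, characterised as filtered interior ++ last initial
theorem rest_eq (comunes : List String) (l : List String) (h : l ≠ []) :
    siglasRest comunes l =
      l.dropLast.flatMap
        (fun w => if comunes.contains w then [] else [PySem.List.pyGetD w.toList 0 ' ']) ++
      [PySem.List.pyGetD (l.getLast h).toList 0 ' '] := by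
  induction l with
  | nil => exact absurd rfl h
  | cons w ws ih =>
    rcases ws with _ | ⟨x, xs⟩
    · simp [siglasRest]
    · rw [siglasRest, ih (by simp)]
      simp [List.getLast]

-- the filtered-interior foldl of A's characterisation equals a flatMap
theorem foldl_filter_eq_flatMap (comunes : List String) (l : List String) (acc : List Char) :
    l.foldl
      (fun sigla w =>
        if !(comunes.contains w) then sigla ++ [PySem.List.pyGetD w.toList 0 ' '] else sigla) acc =
    acc ++ l.flatMap
      (fun w => if comunes.contains w then [] else [PySem.List.pyGetD w.toList 0 ' ']) := by
  have hbody : (fun (sigla : List Char) (w : String) =>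
      if !(comunes.contains w) then sigla ++ [PySem.List.pyGetD w.toList 0 ' '] else sigla) =
      (fun (sigla : List Char) (w : String) =>
        sigla ++ (if comunes.contains w then [] else [PySem.List.pyGetD w.toList 0 ' '])) := by
    funext sigla w
    by_cases hc : w ∈ comunes <;> simp [hc]
  rw [hbody, PySem.List.foldl_append_eq_flatMap]

theorem siglas_spec_aux (p comunes : List String) (hp : p ≠ []) :
    (let sigla : List Char := [PySem.List.pyGetD (PySem.List.pyGetD p 0 "").toList 0 ' '];
     let sigla := (PySem.List.slice p (some 1) (some (-1))).foldl
        (fun sigla w =>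
          if !(comunes.contains w) then sigla ++ [PySem.List.pyGetD w.toList 0 ' '] else sigla) sigla;
     if 1 < p.length then
        sigla ++ [PySem.List.pyGetD (PySem.List.pyGetD p (-1) "").toList 0 ' ']
      else sigla) =
    PySem.List.pyGetD (PySem.List.pyGetD p 0 "").toList 0 ' ' ::
      siglasRest comunes (PySem.List.slice p (some 1) none) := by
  rw [slice_one_neg_one, PySem.List.slice_from_one]
  by_cases h1 : p.length = 1
  · obtain ⟨x, rfl⟩ := List.length_eq_one_iff.mp h1
    simp [siglasRest]
  · have h2 : 2 ≤ p.length := by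
      rcases p with _ | ⟨a, l⟩; · exact absurd rfl hp
      rcases l with _ | _; · exact absurd rfl h1
      simp
    have htail : p.tail ≠ [] := by
      rcases p with _ | ⟨a, l⟩; · exact absurd rfl hp
      simpa using by rintro rfl; simp at h2
    rw [rest_eq comunes p.tail htail]
    simp only [foldl_filter_eq_flatMap]
    have hdt : p.tail.dropLast = p.dropLast.drop 1 := by
      rcases p with _ | ⟨a, l⟩; · simp
      rcases l with _ | ⟨b, m⟩; · simp
      simp [List.dropLast]
    have hlast : PySem.List.pyGetD p (-1) "" = p.tail.getLast htail := by
      rw [PySem.List.pyGetD_neg_one p "" hp]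
      rcases p with _ | ⟨a, l⟩; · exact absurd rfl hp
      rcases l with _ | ⟨b, m⟩; · simp at h2
      simp [List.getLast]
    rw [if_pos (by omega), hdt, hlast]
    simp

-- ===== VERDICT (by name: the statement is the Claim_ definition above) =====
theorem siglas_spec : Claim_equal_siglas := by
  intro frase comunes _ hpre
  unfold Spec_siglas siglas siglas_alt
  have hp : ((PySem.Str.split? frase " ").getD []) ≠ [] := by
    intro h
    unfold Pre_siglas at hpre
    rw [h] at hpre
    simp [PySem.List.pyGetD, PySem.List.pyGet?] at hpre
  refine congrArg (fun l => PySem.Str.upper (String.ofList l)) ?_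
  rw [chars_eq _ comunes hp, siglas_spec_aux _ comunes hp]
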